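-- pv_equiv track=rewrite | github.com/Coding-Test-Break/algorithm_python | programmers_lv1/완전탐색/완전탐색.py | solution
-- ===== SOURCE A (Python) =====
-- def solution(answers):
--     answer = []
--
--     student1 = [1, 2, 3, 4, 5]
--     student2 = [2, 1, 2, 3, 2, 4, 2, 5]
--     student3 = [3, 1, 2, 4, 5]
--     count_ans = list(0 for i in range(3))
--
--     for i, ans in enumerate(answers):
--         if student1[i % 5] == ans: count_ans[0] += 1
--         if student2[i % 8] == ans: count_ans[1] += 1
--         if student3[(i // 2) % 5] == ans: count_ans[2] += 1
--
--     max_num = max(count_ans)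
--     for i in range(count_ans.count(max_num)):
--         answer.append(count_ans.index(max_num) + 1 + i)
--         count_ans.remove(max_num)
--
--     return answer
-- ===== SOURCE B (Python) =====
-- def solution(answers):
--     patterns = [
--         [1, 2, 3, 4, 5],
--         [2, 1, 2, 3, 2, 4, 2, 5],
--         [3, 3, 1, 1, 2, 2, 4, 4, 5, 5],
--     ]
--     n = len(answers)
--     counts = []
--     for p in patterns:
--         full = (p * (n // len(p) + 1))[:n]
--         counts.append(sum(1 for a, b in zip(answers, full) if a == b))
--     m = max(counts)
--     return [i + 1 for i, c in enumerate(counts) if c == m]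
-- ===== Notes on version B (the rewrite author's own statement) =====
-- stated objective: idiomatic
-- what changed: B counts each student independently by zipping the answers with a materialized full-period pattern (student3 expanded to its 10-element cycle), then picks winners with a direct enumerate-filter on the counts, replacing A's single combined loop with modular indices and its repeated count/index/remove winner-extraction hack.
import Mathlib
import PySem

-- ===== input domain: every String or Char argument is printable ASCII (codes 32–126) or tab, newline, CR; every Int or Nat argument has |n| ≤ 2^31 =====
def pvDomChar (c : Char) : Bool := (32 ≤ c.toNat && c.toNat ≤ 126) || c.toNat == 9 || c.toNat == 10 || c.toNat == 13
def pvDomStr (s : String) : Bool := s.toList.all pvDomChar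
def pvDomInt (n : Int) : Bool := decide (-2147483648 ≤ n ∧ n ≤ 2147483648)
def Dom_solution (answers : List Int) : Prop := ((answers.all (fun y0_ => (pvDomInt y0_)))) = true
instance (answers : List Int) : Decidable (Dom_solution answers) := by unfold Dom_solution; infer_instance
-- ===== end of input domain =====

-- B replaces A's combined modular-index loop and its count/index/remove winner hack by three
-- independent zip-counts against materialized full-period patterns plus a direct enumerate-filter (idiomatic).

-- ===== PORT A =====
-- one step of A's for-loop body: the three independent 'if … : count_ans[j] += 1' updates
def stepA (c : List Int) (ia : Int × Int) : List Int :=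
  let c := if PySem.List.pyGetD ([1, 2, 3, 4, 5] : List Int) (PySem.Int.mod ia.1 5) 0 = ia.2
           then c.set 0 (PySem.List.pyGetD c 0 0 + 1) else c
  let c := if PySem.List.pyGetD ([2, 1, 2, 3, 2, 4, 2, 5] : List Int) (PySem.Int.mod ia.1 8) 0 = ia.2
           then c.set 1 (PySem.List.pyGetD c 1 0 + 1) else c
  let c := if PySem.List.pyGetD ([3, 1, 2, 4, 5] : List Int) (PySem.Int.mod (PySem.Int.floordiv ia.1 2) 5) 0 = ia.2
           then c.set 2 (PySem.List.pyGetD c 2 0 + 1) else c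
  c

def solution (answers : List Int) : List Int :=
  let countAns : List Int := [0, 0, 0]
  let countAns := (PySem.List.enumerate answers 0).foldl stepA countAns
  let maxNum : Int := (PySem.List.max? countAns (fun x => x)).getD 0  -- count_ans is nonempty: max() never raises
  let res := (List.range (PySem.List.count countAns maxNum)).foldl
    (fun (st : List Int × List Int) (i : Nat) =>
      -- max_num is always still present in the remaining list, so index?/remove? never return none
      let j : Nat := (PySem.List.index? st.2 maxNum).getD 0
      (st.1 ++ [(j : Int) + 1 + (i : Int)], (PySem.List.remove? st.2 maxNum).getD st.2))
    (([], countAns) : List Int × List Int)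
  res.1

-- ===== PORT B =====
-- full = (p * (n // len(p) + 1))[:n]
def fullOf (p : List Int) (n : Nat) : List Int :=
  PySem.List.slice (PySem.List.pyRepeat p (PySem.Int.floordiv (n : Int) (PySem.List.len p) + 1)) none (some (n : Int))

-- sum(1 for a, b in zip(answers, full) if a == b)
def countMatch (answers full : List Int) : Int :=
  ((answers.zip full).map (fun ab => if ab.1 = ab.2 then (1 : Int) else 0)).sum

def solution_alt (answers : List Int) : List Int :=
  let patterns : List (List Int) :=
    [[1, 2, 3, 4, 5], [2, 1, 2, 3, 2, 4, 2, 5], [3, 3, 1, 1, 2, 2, 4, 4, 5, 5]]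
  let n := answers.length
  let counts : List Int := patterns.map (fun p => countMatch answers (fullOf p n))
  let m : Int := (PySem.List.max? counts (fun x => x)).getD 0  -- counts is nonempty: max() never raises
  (PySem.List.enumerate counts 0).filterMap (fun ic => if ic.2 = m then some (ic.1 + 1) else none)

-- ===== PRECONDITION & SPEC =====
def Spec_solution (answers : List Int) (out : List Int) : Prop := out = solution_alt answers
instance (answers : List Int) (out : List Int) : Decidable (Spec_solution answers out) := by unfold Spec_solution; infer_instance

-- ===== CLAIM (what is proved, stated in full; the proofs are below) =====
def Claim_equal_solution : Prop := ∀ (answers : List Int), Dom_solution answers → Spec_solution answers (solution answers)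

-- ===== LEMMAS AND PROOFS =====

-- the per-index pattern values the counting reduces to (patterns at index i % period)
def g1 (k : Nat) : Int := (([1,2,3,4,5] : List Int)).getD (k % 5) 0
def g2 (k : Nat) : Int := (([2,1,2,3,2,4,2,5] : List Int)).getD (k % 8) 0
def g3 (k : Nat) : Int := (([3,3,1,1,2,2,4,4,5,5] : List Int)).getD (k % 10) 0

-- count of matches of g against xs, starting at index k
def cnt (g : Nat → Int) : List Int → Nat → Int
  | [], _ => 0
  | a :: t, k => (if g k = a then 1 else 0) + cnt g t (k + 1)

lemma flat_rep (p : List Int) (m : Nat) :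
    (List.replicate m p).flatten = (List.range (m * p.length)).map (fun i => p.getD (i % p.length) 0) := by
  induction m with
  | zero => simp
  | succ m ih =>
    rw [List.replicate_succ, List.flatten_cons, ih]
    have h1 : (m+1) * p.length = p.length + m * p.length := by ring
    rw [h1, List.range_add, List.map_append]
    congr 1
    · apply List.ext_getElem
      · simp
      · intro i h1 h2
        simp at h2
        simp [Nat.mod_eq_of_lt h2, List.getElem?_eq_getElem h2]
    · simp [List.map_map, Function.comp, Nat.add_mod_left]

lemma take_le (n L : Nat) (hL : 0 < L) : n ≤ (n / L + 1) * L := by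
  have h1 : L * (n / L) + n % L = n := Nat.div_add_mod n L
  have h2 : n % L < L := Nat.mod_lt n hL
  have h3 : (n / L + 1) * L = L * (n / L) + L := by ring
  omega

lemma fullOf_eq (p : List Int) (hp : p ≠ []) (n : Nat) :
    fullOf p n = (List.range n).map (fun i => p.getD (i % p.length) 0) := by
  have hL : 0 < p.length := List.length_pos_iff.mpr hp
  have e1 : PySem.Int.floordiv (n : Int) (PySem.List.len p) = ((n / p.length : Nat) : Int) := by
    simp [PySem.Int.floordiv, Int.fdiv_eq_ediv, PySem.List.len]
  rw [fullOf, e1]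
  have e2 : (((n / p.length : Nat) : Int) + 1) = ((n / p.length + 1 : Nat) : Int) := by push_cast; ring
  rw [e2, PySem.List.pyRepeat, Int.toNat_natCast, PySem.List.slice_to_natCast,
      flat_rep p, ← List.map_take, List.take_range]
  congr 1
  rw [Nat.min_eq_left (take_le n p.length hL)]

lemma pat3_bridge (k : Nat) :
    (([3,1,2,4,5] : List Int)).getD ((k / 2) % 5) 0 = g3 k := by
  unfold g3
  have h : (k / 2) % 5 = (k % 10) / 2 := by omega
  have h2 : k % 10 < 10 := by omega
  rw [h]
  interval_cases h3 : (k % 10) <;> rfl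

lemma chain (a b c : Int) (p1 p2 p3 : Prop) [Decidable p1] [Decidable p2] [Decidable p3] :
    (let c1 := if p1 then [a,b,c].set 0 (PySem.List.pyGetD [a,b,c] 0 0 + 1) else [a,b,c]
     let c2 := if p2 then c1.set 1 (PySem.List.pyGetD c1 1 0 + 1) else c1
     let c3 := if p3 then c2.set 2 (PySem.List.pyGetD c2 2 0 + 1) else c2
     c3) = [a + (if p1 then 1 else 0), b + (if p2 then 1 else 0), c + (if p3 then 1 else 0)] := by
  by_cases h1 : p1 <;> by_cases h2 : p2 <;> by_cases h3 : p3 <;>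
    simp only [h1, h2, h3, if_true, if_false, add_zero] <;> rfl

lemma stepA_eval (a b c x : Int) (k : Nat) :
    stepA [a, b, c] ((k : Int), x) =
      [a + (if g1 k = x then 1 else 0), b + (if g2 k = x then 1 else 0),
       c + (if g3 k = x then 1 else 0)] := by
  have e1 : PySem.Int.mod (k : Int) 5 = ((k % 5 : Nat) : Int) := by
    simp [PySem.Int.mod, Int.fmod_eq_emod]
  have e2 : PySem.Int.mod (k : Int) 8 = ((k % 8 : Nat) : Int) := by
    simp [PySem.Int.mod, Int.fmod_eq_emod]
  have e3 : PySem.Int.mod (PySem.Int.floordiv (k : Int) 2) 5 = (((k / 2) % 5 : Nat) : Int) := by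
    simp [PySem.Int.mod, PySem.Int.floordiv, Int.fmod_eq_emod, Int.fdiv_eq_ediv]
  simp only [stepA, e1, e2, e3, PySem.List.pyGetD_natCast, pat3_bridge]
  exact chain a b c _ _ _

lemma foldA (xs : List Int) : ∀ (k : Nat) (a b c : Int),
    (PySem.List.enumerate xs (k : Int)).foldl stepA [a, b, c] =
      [a + cnt g1 xs k, b + cnt g2 xs k, c + cnt g3 xs k] := by
  induction xs with
  | nil => intro k a b c; simp [PySem.List.enumerate_nil, cnt]
  | cons x t ih =>
    intro k a b c
    rw [PySem.List.enumerate_cons]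
    have hk : ((k : Int) + 1) = ((k + 1 : Nat) : Int) := by push_cast; ring
    rw [List.foldl_cons, stepA_eval, hk, ih]
    simp [cnt, add_assoc]

lemma zipcount (g : Nat → Int) (xs : List Int) : ∀ k : Nat,
    countMatch xs ((List.range' k xs.length).map g) = cnt g xs k := by
  induction xs with
  | nil => intro k; simp [countMatch, cnt]
  | cons x t ih =>
    intro k
    rw [show (x :: t).length = t.length + 1 from rfl, List.range'_succ, List.map_cons]
    simp only [countMatch, List.zip_cons_cons, List.map_cons, List.sum_cons] at *
    rw [ih]
    congr 1
    by_cases h : g k = x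
    · rw [if_pos h.symm, if_pos h]
    · rw [if_neg (fun hh => h hh.symm), if_neg h]

lemma winner (a b c m : Int) (hm : m ∈ ([a, b, c] : List Int)) :
    ((List.range (PySem.List.count [a, b, c] m)).foldl
        (fun (st : List Int × List Int) (i : Nat) =>
          (st.1 ++ [((PySem.List.index? st.2 m).getD 0 : Int) + 1 + (i : Int)],
           (PySem.List.remove? st.2 m).getD st.2))
        (([], [a, b, c]) : List Int × List Int)).1
      = (PySem.List.enumerate [a, b, c] 0).filterMap
          (fun ic => if ic.2 = m then some (ic.1 + 1) else none) := by
  by_cases ha : a = m <;> by_cases hb : b = m <;> by_cases hc : c = m <;>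
    (try subst ha) <;> (try subst hb) <;> (try subst hc) <;>
    (try simp_all [PySem.List.count_eq, List.range_succ,
          PySem.List.remove?_cons_self, PySem.List.remove?_cons_of_ne,
          PySem.List.enumerate_cons, PySem.List.enumerate_nil,
          List.idxOf?, List.findIdx?, List.findIdx?.go])

theorem solution_spec_aux (answers : List Int) : solution answers = solution_alt answers := by
  have hc1 : countMatch answers (fullOf [1,2,3,4,5] answers.length) = cnt g1 answers 0 := by
    rw [fullOf_eq _ (by simp) _, List.range_eq_range']
    exact zipcount g1 answers 0
  have hc2 : countMatch answers (fullOf [2,1,2,3,2,4,2,5] answers.length) = cnt g2 answers 0 := by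
    rw [fullOf_eq _ (by simp) _, List.range_eq_range']
    exact zipcount g2 answers 0
  have hc3 : countMatch answers (fullOf [3,3,1,1,2,2,4,4,5,5] answers.length) = cnt g3 answers 0 := by
    rw [fullOf_eq _ (by simp) _, List.range_eq_range']
    exact zipcount g3 answers 0
  simp only [solution, solution_alt, List.map_cons, List.map_nil]
  simp only [hc1, hc2, hc3]
  rw [show PySem.List.enumerate answers (0:Int) = PySem.List.enumerate answers ((0:Nat):Int) from rfl]
  rw [foldA answers 0 0 0 0]
  simp only [zero_add]
  obtain ⟨m, hmx⟩ : ∃ m, PySem.List.max? [cnt g1 answers 0, cnt g2 answers 0, cnt g3 answers 0] (fun x => x) = some m := by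
    cases h : PySem.List.max? [cnt g1 answers 0, cnt g2 answers 0, cnt g3 answers 0] (fun x => x) with
    | none => simp [PySem.List.max?_eq_none_iff] at h
    | some mm => exact ⟨mm, rfl⟩
  rw [hmx]
  simp only [Option.getD_some]
  exact winner _ _ _ m (PySem.List.max?_mem hmx)

-- ===== VERDICT (by name: the statement is the Claim_ definition above) =====
theorem solution_spec : Claim_equal_solution := by
  intro answers _
  exact solution_spec_aux answers
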